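-- pv_equiv track=rewrite | github.com/gs-ai/ACE-T | SPECTRUMv2/graph/build_graph.py | _category_color_for
-- ===== SOURCE A (Python) =====
-- CATEGORY_COLORS = {
--     'Law': '#ff1a1a',
--     'Government': '#5fd1ff',
--     'Manufacturing': '#ff7a8a',
--     'Technology': '#ff9a3c',
--     'Healthcare': '#ffd452',
--     'Financial Services': '#43d6c6',
--     'Construction': '#7ab6ff',
--     'Business Services': '#b27cff',
--     'Education': '#c8ced6',
--     'Energy': '#5b8cff',
--     'Transportation': '#ff8f66',
--     'ThreatFox': '#2eda34',
--     'URLhaus': '#00c8ff'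
-- }
--
-- def _normalize_category_key(value: str) -> str:
--     if not value:
--         return ''
--     return str(value).strip().lower()
--
-- def _category_color_for(value: str) -> str | None:
--     if not value:
--         return None
--     key = _normalize_category_key(value)
--     for name, color in CATEGORY_COLORS.items():
--         if _normalize_category_key(name) == key:
--             return color
--     # Fuzzy match for composite labels
--     for name, color in CATEGORY_COLORS.items():
--         needle = _normalize_category_key(name)
--         if needle and needle in key:
--             return color
--     return None
-- ===== SOURCE B (Python) =====
-- CATEGORY_COLORS = {
--     'Law': '#ff1a1a',
--     'Government': '#5fd1ff',
--     'Manufacturing': '#ff7a8a',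
--     'Technology': '#ff9a3c',
--     'Healthcare': '#ffd452',
--     'Financial Services': '#43d6c6',
--     'Construction': '#7ab6ff',
--     'Business Services': '#b27cff',
--     'Education': '#c8ced6',
--     'Energy': '#5b8cff',
--     'Transportation': '#ff8f66',
--     'ThreatFox': '#2eda34',
--     'URLhaus': '#00c8ff'
-- }
--
-- def _normalize_category_key(value: str) -> str:
--     if not value:
--         return ''
--     return str(value).strip().lower()
--
-- def _category_color_for(value: str) -> str | None:
--     if not value:
--         return None
--     key = _normalize_category_key(value)
--     fuzzy = None
--     for name, color in CATEGORY_COLORS.items():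
--         needle = _normalize_category_key(name)
--         if needle == key:
--             return color  # exact match always wins
--         if fuzzy is None and needle and needle in key:
--             fuzzy = color  # first fuzzy candidate, kept as fallback
--     return fuzzy
-- ===== Notes on version B (the rewrite author's own statement) =====
-- stated objective: simpler
-- what changed: Replaces A's two sequential scans of CATEGORY_COLORS (exact pass, then fuzzy pass) by one single scan that returns immediately on an exact match and holds the first fuzzy candidate as a fallback returned after the loop.
import Mathlib
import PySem

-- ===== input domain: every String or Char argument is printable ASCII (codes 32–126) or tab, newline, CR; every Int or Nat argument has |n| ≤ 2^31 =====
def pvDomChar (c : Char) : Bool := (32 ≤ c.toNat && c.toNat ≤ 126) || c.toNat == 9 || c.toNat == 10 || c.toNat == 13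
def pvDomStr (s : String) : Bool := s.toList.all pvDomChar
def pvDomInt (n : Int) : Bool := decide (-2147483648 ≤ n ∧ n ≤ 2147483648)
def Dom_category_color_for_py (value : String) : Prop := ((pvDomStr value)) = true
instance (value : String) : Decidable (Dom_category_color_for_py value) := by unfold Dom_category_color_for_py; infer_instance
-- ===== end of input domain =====

-- B changes only the decomposition: one scan with a held fuzzy fallback instead of A's two scans; equal return values everywhere.

-- shared module-level context (CATEGORY_COLORS and _normalize_category_key from the Python module)
def pyCATEGORY_COLORS : List (String × String) :=
  [("Law", "#ff1a1a"), ("Government", "#5fd1ff"), ("Manufacturing", "#ff7a8a"),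
   ("Technology", "#ff9a3c"), ("Healthcare", "#ffd452"), ("Financial Services", "#43d6c6"),
   ("Construction", "#7ab6ff"), ("Business Services", "#b27cff"), ("Education", "#c8ced6"),
   ("Energy", "#5b8cff"), ("Transportation", "#ff8f66"), ("ThreatFox", "#2eda34"),
   ("URLhaus", "#00c8ff")]

def pyNormalizeCategoryKey (value : String) : String :=
  if value = "" then "" else PySem.Str.lower (PySem.Str.strip value)

-- ===== PORT A =====
-- first loop of A: return the first exact normalized match
def pyLoopExact (items : List (String × String)) (key : String) : Option String :=
  match items with
  | [] => none
  | (name, color) :: rest =>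
      if pyNormalizeCategoryKey name = key then some color else pyLoopExact rest key

-- second loop of A: return the first fuzzy (substring) match
def pyLoopFuzzy (items : List (String × String)) (key : String) : Option String :=
  match items with
  | [] => none
  | (name, color) :: rest =>
      let needle := pyNormalizeCategoryKey name
      if needle ≠ "" ∧ PySem.Str.isIn needle key then some color else pyLoopFuzzy rest key

def category_color_for_py (value : String) : Option String :=
  if value = "" then none
  else
    let key := pyNormalizeCategoryKey value
    match pyLoopExact pyCATEGORY_COLORS key with
    | some color => some color
    | none => pyLoopFuzzy pyCATEGORY_COLORS key

-- ===== PORT B =====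
-- single loop of B, carrying the first fuzzy candidate as a fallback
def pyScan (items : List (String × String)) (key : String) (fuzzy : Option String) : Option String :=
  match items with
  | [] => fuzzy
  | (name, color) :: rest =>
      let needle := pyNormalizeCategoryKey name
      if needle = key then some color
      else
        pyScan rest key
          (if fuzzy = none ∧ needle ≠ "" ∧ PySem.Str.isIn needle key then some color else fuzzy)

def category_color_for_py_alt (value : String) : Option String :=
  if value = "" then none
  else pyScan pyCATEGORY_COLORS (pyNormalizeCategoryKey value) none

-- ===== PRECONDITION & SPEC =====
def Spec_category_color_for_py (value : String) (out : Option String) : Prop := out = category_color_for_py_alt value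
instance (value : String) (out : Option String) : Decidable (Spec_category_color_for_py value out) := by unfold Spec_category_color_for_py; infer_instance

-- ===== CLAIM (what is proved, stated in full; the proofs are below) =====
def Claim_equal_category_color_for_py : Prop := ∀ (value : String), Dom_category_color_for_py value → Spec_category_color_for_py value (category_color_for_py value)

-- ===== LEMMAS AND PROOFS =====

-- the single scan equals: first exact match, else the held fallback, else the first fuzzy match
theorem pyScan_eq (items : List (String × String)) (key : String) (fuzzy : Option String) :
    pyScan items key fuzzy =
      match pyLoopExact items key with
      | some c => some c
      | none => match fuzzy with
                | some f => some f
                | none => pyLoopFuzzy items key := by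
  induction items generalizing fuzzy with
  | nil => cases fuzzy <;> simp [pyScan, pyLoopExact, pyLoopFuzzy]
  | cons p rest ih =>
      obtain ⟨name, color⟩ := p
      simp only [pyScan, pyLoopExact, pyLoopFuzzy]
      by_cases hx : pyNormalizeCategoryKey name = key
      · simp [hx]
      · simp only [hx, if_false, ih]
        cases fuzzy with
        | some f => simp
        | none => cases pyLoopExact rest key <;> split_ifs <;> simp_all

-- ===== VERDICT (by name: the statement is the Claim_ definition above) =====
theorem category_color_for_py_spec : Claim_equal_category_color_for_py := by
  intro value _
  unfold Spec_category_color_for_py category_color_for_py category_color_for_py_alt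
  by_cases hv : value = ""
  · simp [hv]
  · simp only [hv, if_false, pyScan_eq]
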